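-- pv_equiv track=rewrite | github.com/981377660LMT/algorithm-study | 16_滑动窗口/k重复字符子串词频统计/s 中包含 t 中所有字符的子字符串个数.py | solve
-- ===== SOURCE A (Python) =====
-- from collections import Counter
--
-- def solve(s: str, t: str) -> int:
--     res, left, need, cur = 0, 0, Counter(t), Counter()
--     for char in s:
--         cur[char] += 1
--         while True:
--             next = cur.copy()
--             next[s[left]] -= 1
--             if next & need == need:
--                 cur, left = next, left + 1
--             else:
--                 break
--         if cur & need == need:
--             res += left + 1
--     return res
-- ===== SOURCE B (Python) =====
-- def solve(s: str, t: str) -> int: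
--     # For each end index r, the valid start indices l form a prefix [0, L(r)]:
--     # count of c in s[l..r] >= need[c] iff l <= (need[c]-th last occurrence of c up to r).
--     # So L(r) = min over needed chars of that occurrence, and the answer adds L(r)+1.
--     need = {}
--     for c in t:
--         need[c] = need.get(c, 0) + 1
--     occ = {c: [] for c in need}
--     res = 0
--     for r, ch in enumerate(s):
--         if ch in occ:
--             occ[ch].append(r)
--         best = r
--         ok = True
--         for c, k in need.items():
--             lst = occ[c]
--             if len(lst) < k:
--                 ok = False
--                 break
--             if lst[-k] < best:
--                 best = lst[-k]
--         if ok: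
--             res += best + 1
--     return res
-- ===== Notes on version B (the rewrite author's own statement) =====
-- stated objective: faster
-- what changed: A slides a window, shrinking via repeated Counter copy + intersection tests per step; B has no window and no shrink loop: it keeps per-character occurrence-position lists and, for each end index r, computes the maximal valid start directly as the minimum over needed chars c of the need[c]-th-last occurrence of c, adding that+1 — each step is a few list lookups instead of Counter copies.
import Mathlib
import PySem

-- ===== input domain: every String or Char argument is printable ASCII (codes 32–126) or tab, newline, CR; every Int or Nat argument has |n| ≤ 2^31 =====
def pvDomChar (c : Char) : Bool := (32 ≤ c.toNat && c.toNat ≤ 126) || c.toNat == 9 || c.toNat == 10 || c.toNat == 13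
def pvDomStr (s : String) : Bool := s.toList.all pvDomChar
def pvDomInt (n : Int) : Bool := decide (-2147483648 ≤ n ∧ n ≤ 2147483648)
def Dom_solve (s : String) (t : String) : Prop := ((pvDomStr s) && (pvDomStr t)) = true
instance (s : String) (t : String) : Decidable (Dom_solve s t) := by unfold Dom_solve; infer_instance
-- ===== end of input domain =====

-- B drops A's shrinking window entirely: per end index it takes the minimum over needed chars
-- of the need[c]-th-last occurrence position (objective: faster, measured; no Counter copies).

-- ===== PORT A =====
-- Counter.__and__ (exact CPython port: iterate self's items, keep min(count, other[key]) where positive)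
def pvCtrAnd (a b : PySem.Dict Char Int) : PySem.Dict Char Int :=
  PySem.Dict.mk (a.items.filterMap (fun p =>
    let m := min p.2 (b.getD p.1 0)
    if 0 < m then some (p.1, m) else none))

-- Counter '==' (exact here: dict equality — same keys, same values; both sides hold no zero counts)
def pvCtrEq (a b : PySem.Dict Char Int) : Bool :=
  (a.items.all fun p => b.get? p.1 == some p.2) && (b.items.all fun p => a.get? p.1 == some p.2)

-- A's 'while True' shrink loop; fuel (called with |s|+1, ≥ the ≤|s| possible iterations) only
-- makes the recursion structural; the pyGet? none branch is where Python raises IndexError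
-- (reachable only for t = "" with s ≠ "", which Pre_solve excludes).
def solveLoopA (need : PySem.Dict Char Int) (cs : List Char) :
    Nat → PySem.Dict Char Int → Nat → (PySem.Dict Char Int × Nat)
  | 0, cur, left => (cur, left)
  | fuel+1, cur, left =>
    match PySem.List.pyGet? cs (left : Int) with
    | none => (cur, left)
    | some ch =>
      let next := cur.modify ch 0 (· - 1)        -- next = cur.copy(); next[s[left]] -= 1
      if pvCtrEq (pvCtrAnd next need) need then solveLoopA need cs fuel next (left+1)
      else (cur, left)

-- the 'for char in s' loop of A, state (res, left, cur)
def solveOuterA (need : PySem.Dict Char Int) (cs : List Char) :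
    List Char → (Int × Nat × PySem.Dict Char Int) → Int
  | [], st => st.1
  | ch :: rest, st =>
    let cur1 := st.2.2.modify ch 0 (· + 1)       -- cur[char] += 1  (Counter: missing key counts 0)
    let p := solveLoopA need cs (cs.length + 1) cur1 st.2.1
    let res2 := if pvCtrEq (pvCtrAnd p.1 need) need then st.1 + ((p.2 : Int) + 1) else st.1
    solveOuterA need cs rest (res2, p.2, p.1)

def solve (s : String) (t : String) : Int :=
  solveOuterA (PySem.Dict.counter t.toList) s.toList s.toList (0, 0, PySem.Dict.empty)

-- ===== PORT B =====
-- B's inner 'for c, k in need.items()' loop with its break, state (ok, best)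
def solveInnerB (occ : PySem.Dict Char (List Int)) : List (Char × Int) → Int → (Bool × Int)
  | [], best => (true, best)
  | (c, k) :: rest, best =>
    let lst := occ.getD c []                              -- lst = occ[c]
    if (lst.length : Int) < k then (false, best)          -- if len(lst) < k: ok = False; break
    else
      -- lst[-k]; in range: need's values are ≥ 1 and k ≤ len(lst) here, so pyGet? is some
      let v := (PySem.List.pyGet? lst (-k)).getD 0
      solveInnerB occ rest (if v < best then v else best) -- if lst[-k] < best: best = lst[-k]

-- B's 'for r, ch in enumerate(s)' loop, state (occ, res), explicit counter r
def solveOuterB (need : PySem.Dict Char Int) :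
    List Char → Nat → PySem.Dict Char (List Int) → Int → Int
  | [], _, _, res => res
  | ch :: rest, r, occ, res =>
    let occ1 := if occ.contains ch then occ.modify ch [] (· ++ [(r : Int)]) else occ
    let q := solveInnerB occ1 need.items (r : Int)
    let res1 := if q.1 then res + q.2 + 1 else res        -- if ok: res += best + 1
    solveOuterB need rest (r+1) occ1 res1

def solve_alt (s : String) (t : String) : Int :=
  let need := t.toList.foldl (fun d c => d.insert c (d.getD c 0 + 1)) PySem.Dict.empty
  let occ0 := need.keys.foldl (fun d c => d.insert c ([] : List Int)) PySem.Dict.empty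
  solveOuterB need s.toList 0 occ0 0

-- ===== PRECONDITION & SPEC =====
-- Pre_ excludes t = "" with s ≠ "": there A's shrink loop walks left past the end of s and
-- raises IndexError (it returns no value), while B returns a number.
def Pre_solve (s : String) (t : String) : Prop := t ≠ "" ∨ s = ""
instance (s : String) (t : String) : Decidable (Pre_solve s t) := by unfold Pre_solve; infer_instance
def pvWitness_solve : String × String := ("abcab", "ab")

def Spec_solve (s : String) (t : String) (out : Int) : Prop := out = solve_alt s t
instance (s : String) (t : String) (out : Int) : Decidable (Spec_solve s t out) := by unfold Spec_solve; infer_instance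

-- ===== CLAIM (what is proved, stated in full; the proofs are below) =====
def Claim_equal_solve : Prop := ∀ (s : String) (t : String), Dom_solve s t → Pre_solve s t → Spec_solve s t (solve s t)

-- ===== LEMMAS AND PROOFS =====

-- the window s[l..r) and its per-character counts
def pvWin (cs : List Char) (l r : Nat) : List Char := (cs.take r).drop l
def pvCnt (cs : List Char) (l r : Nat) : Char → Int := fun c => ((pvWin cs l r).count c : Int)
-- "this need-item is satisfied by window counts f"
def pvSat (f : Char → Int) (p : Char × Int) : Bool := decide (p.2 ≤ f p.1)
-- "the window s[l..r] contains all of t" (r inclusive, as in both loops)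
def pvCov (N : PySem.Dict Char Int) (cs : List Char) (l r : Nat) : Bool :=
  N.items.all (pvSat (pvCnt cs l (r+1)))
-- positions of c among the first m characters (as produced in occ's lists)
def pvPosN (cs : List Char) (c : Char) (m : Nat) : List Nat :=
  (List.range m).filter (fun i => cs[i]? == some c)
def pvPos (cs : List Char) (c : Char) (m : Nat) : List Int :=
  (pvPosN cs c m).map (fun i : Nat => (i : Int))

lemma pvCtrAnd_keys_sublist (w N : PySem.Dict Char Int) :
    (pvCtrAnd w N).keys.Sublist w.keys := by
  show List.Sublist ((List.filterMap _ w.items).map Prod.fst) (w.items.map Prod.fst)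
  induction w.items with
  | nil => simp
  | cons a tl ih =>
    by_cases hc : 0 < min a.2 (N.getD a.1 0)
    · rw [List.filterMap_cons]
      simp only [if_pos hc, List.map_cons]
      exact List.Sublist.cons₂ _ ih
    · rw [List.filterMap_cons]
      simp only [if_neg hc, List.map_cons]
      exact List.Sublist.cons _ ih

lemma pvCtrAnd_nodup (w N : PySem.Dict Char Int) (hw : w.keys.Nodup) :
    (pvCtrAnd w N).keys.Nodup :=
  (pvCtrAnd_keys_sublist w N).nodup hw

lemma pvCtrAnd_mem (w N : PySem.Dict Char Int) (p : Char × Int) :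
    p ∈ (pvCtrAnd w N).items ↔
      ∃ v, (p.1, v) ∈ w.items ∧ min v (N.getD p.1 0) = p.2 ∧ 0 < p.2 := by
  show p ∈ List.filterMap _ w.items ↔ _
  rw [List.mem_filterMap]
  constructor
  · rintro ⟨q, hq, hgq⟩
    simp only at hgq
    split at hgq
    · cases hgq
      exact ⟨q.2, by simpa using hq, rfl, by assumption⟩
    · cases hgq
  · rintro ⟨v, hv, hmin, hpos⟩
    refine ⟨(p.1, v), hv, ?_⟩
    simp only
    rw [hmin, if_pos hpos]

lemma pvGetD_pos_mem (w : PySem.Dict Char Int) (c : Char) (h : w.getD c 0 ≠ 0) :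
    (c, w.getD c 0) ∈ w.items := by
  rcases hg : w.get? c with _ | v
  · rw [PySem.Dict.getD_eq_get?_getD, hg] at h; simp at h
  · have := PySem.Dict.mem_items_of_get?_eq_some w hg
    rwa [PySem.Dict.getD_eq_get?_getD, hg]

lemma pvCtrEq_and (N w : PySem.Dict Char Int) (hN : N.keys.Nodup)
    (hpos : ∀ p ∈ N.items, 0 < p.2) (hw : w.keys.Nodup) :
    pvCtrEq (pvCtrAnd w N) N = N.items.all (pvSat (fun c => w.getD c 0)) := by
  have hXnd := pvCtrAnd_nodup w N hw
  rw [Bool.eq_iff_iff]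
  simp only [pvCtrEq, Bool.and_eq_true, List.all_eq_true, beq_iff_eq]
  constructor
  · rintro ⟨_, H2⟩ p hp
    obtain ⟨c, k⟩ := p
    have hk := hpos _ hp
    simp only at hk
    have hX := H2 _ hp
    simp only at hX
    have hmem := PySem.Dict.mem_items_of_get?_eq_some _ hX
    rw [pvCtrAnd_mem] at hmem
    obtain ⟨v, hv, hmin, hkpos⟩ := hmem
    simp only at hv hmin
    have hwv := PySem.Dict.getD_of_mem_items w hv hw 0
    simp only [pvSat, decide_eq_true_eq]
    rw [hwv]
    omega
  · intro H
    constructor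
    · intro p hp
      rw [pvCtrAnd_mem] at hp
      obtain ⟨v, hv, hmin, hppos⟩ := hp
      have hwv := PySem.Dict.getD_of_mem_items w hv hw 0
      have hNg : N.getD p.1 0 ≠ 0 := by omega
      have hNm := pvGetD_pos_mem N p.1 hNg
      have h2 := H _ hNm
      simp only [pvSat, decide_eq_true_eq] at h2
      rw [hwv] at h2
      have hkv : min v (N.getD p.1 0) = N.getD p.1 0 := by omega
      rw [PySem.Dict.get?_eq_some_iff_mem_items N p.1 p.2 hN]
      rw [hkv] at hmin
      rw [← hmin]
      exact hNm
    · intro p hp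
      obtain ⟨c, k⟩ := p
      have hk := hpos _ hp
      have h2 := H _ hp
      simp only [pvSat, decide_eq_true_eq] at h2
      simp only at hk h2 ⊢
      have hNv := PySem.Dict.getD_of_mem_items N hp hN 0
      have hwg : w.getD c 0 ≠ 0 := by omega
      have hwm := pvGetD_pos_mem w c hwg
      rw [(PySem.Dict.get?_eq_some_iff_mem_items _ c k hXnd)]
      rw [pvCtrAnd_mem]
      exact ⟨w.getD c 0, hwm, by simp only; omega, hk⟩

-- a covered window is nonempty
lemma pvCov_le (N : PySem.Dict Char Int) (hpos : ∀ p ∈ N.items, 0 < p.2) (hne : N.items ≠ [])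
    (cs : List Char) (l r : Nat) (hr : r ≤ cs.length)
    (h : N.items.all (pvSat (pvCnt cs l r)) = true) : l < r := by
  obtain ⟨p, hp⟩ := List.exists_mem_of_ne_nil _ hne
  have h1 := hpos p hp
  rw [List.all_eq_true] at h
  have h2 := h p hp
  simp only [pvSat, decide_eq_true_eq] at h2
  have h3 : ((pvWin cs l r).count p.1 : Int) ≤ ((pvWin cs l r).length : Int) := by
    exact_mod_cast List.count_le_length
  have h4 : (pvWin cs l r).length = r ⊓ cs.length - l := by simp [pvWin]
  have h5 : 0 < (pvWin cs l r).length := by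
    rcases Nat.eq_zero_or_pos (pvWin cs l r).length with hlen | hlen
    · rw [List.length_eq_zero_iff] at hlen
      simp [pvCnt, hlen] at h2
      omega
    · exact hlen
  omega

lemma pvCnt_push (cs : List Char) (l r : Nat) (hl : l ≤ r) (hr : r < cs.length) (c : Char) :
    pvCnt cs l (r+1) c = if c = cs[r] then pvCnt cs l r c + 1 else pvCnt cs l r c := by
  have h1 : cs.take (r+1) = cs.take r ++ [cs[r]] := by
    rw [List.take_add_one]; simp [List.getElem?_eq_getElem hr]
  have h2 : pvWin cs l (r+1) = pvWin cs l r ++ [cs[r]] := by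
    unfold pvWin
    rw [h1, List.drop_append_of_le_length (by simp; omega)]
  simp only [pvCnt, h2, List.count_append, List.count_singleton]
  rcases eq_or_ne c cs[r] with h | h
  · simp [h]
  · simp [h, Ne.symm h]

lemma pvCnt_pop (cs : List Char) (l r : Nat) (hl : l < r) (hr : r ≤ cs.length) (c : Char) :
    pvCnt cs (l+1) r c = if c = cs[l]'(lt_of_lt_of_le hl hr) then pvCnt cs l r c - 1 else pvCnt cs l r c := by
  have hlt : l < (cs.take r).length := by simp; omega
  have h2 : pvWin cs l r = cs[l]'(lt_of_lt_of_le hl hr) :: pvWin cs (l+1) r := by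
    unfold pvWin
    rw [List.drop_eq_getElem_cons hlt, List.getElem_take]
  have h3 := congrArg (List.count c) h2
  simp only [List.count_cons] at h3
  rcases eq_or_ne c (cs[l]'(lt_of_lt_of_le hl hr)) with h | h
  · subst h
    simp only [pvCnt]
    simp at h3 ⊢; omega
  · simp only [pvCnt, if_neg h]
    simp [Ne.symm h] at h3; omega

lemma pvCnt_nonneg (cs : List Char) (l r : Nat) (c : Char) : 0 ≤ pvCnt cs l r c := by
  simp [pvCnt]

-- counts only grow when the window widens to the left
lemma pvCnt_anti (cs : List Char) (l l' r : Nat) (h : l' ≤ l) (c : Char) :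
    pvCnt cs l r c ≤ pvCnt cs l' r c := by
  have : pvWin cs l r = (pvWin cs l' r).drop (l - l') := by
    unfold pvWin
    rw [List.drop_drop]
    congr 1
    omega
  simp only [pvCnt, this]
  exact_mod_cast (List.drop_sublist _ _).count_le c

lemma pvCov_mono_left (N : PySem.Dict Char Int) (cs : List Char) (l l' r : Nat) (h : l' ≤ l)
    (hc : pvCov N cs l r = true) : pvCov N cs l' r = true := by
  rw [pvCov, List.all_eq_true] at hc ⊢
  intro p hp
  have := hc p hp
  simp only [pvSat, decide_eq_true_eq] at this ⊢
  exact le_trans this (pvCnt_anti cs l l' (r+1) h p.1)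

lemma pvCov_mono_right (N : PySem.Dict Char Int) (cs : List Char) (l r : Nat)
    (hl : l ≤ r + 1) (hr : r + 1 < cs.length)
    (hc : pvCov N cs l r = true) : pvCov N cs l (r+1) = true := by
  rw [pvCov, List.all_eq_true] at hc ⊢
  intro p hp
  have := hc p hp
  simp only [pvSat, decide_eq_true_eq] at this ⊢
  rw [pvCnt_push cs l (r+1) hl hr]
  split_ifs with h
  · have := pvCnt_nonneg cs l (r+1) p.1
    omega
  · exact this

-- A's shrink loop reaches exactly the maximal covered start (or stops at once if uncovered)
lemma pvInnerA (N : PySem.Dict Char Int) (hN : N.keys.Nodup)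
    (hpos : ∀ p ∈ N.items, 0 < p.2) (hne : N.items ≠ [])
    (cs : List Char) (r : Nat) (hr : r < cs.length) :
    ∀ (fuel l : Nat) (cur : PySem.Dict Char Int), l ≤ r → r + 2 - l ≤ fuel →
      (∀ c, cur.getD c 0 = pvCnt cs l (r+1) c) → cur.keys.Nodup →
      (∀ c, (solveLoopA N cs fuel cur l).1.getD c 0
          = pvCnt cs (solveLoopA N cs fuel cur l).2 (r+1) c) ∧
      (solveLoopA N cs fuel cur l).1.keys.Nodup ∧
      l ≤ (solveLoopA N cs fuel cur l).2 ∧ (solveLoopA N cs fuel cur l).2 ≤ r ∧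
      (pvCov N cs l r = true →
        pvCov N cs (solveLoopA N cs fuel cur l).2 r = true ∧
        pvCov N cs ((solveLoopA N cs fuel cur l).2 + 1) r = false) ∧
      (pvCov N cs l r = false → (solveLoopA N cs fuel cur l).2 = l) := by
  intro fuel
  induction fuel with
  | zero => intro l cur hlr hfuel; omega
  | succ f ih =>
    intro l cur hlr hfuel hcur hcnd
    have hln : l < cs.length := lt_of_le_of_lt hlr hr
    have hget : PySem.List.pyGet? cs (l : Int) = some (cs[l]'hln) := by
      rw [PySem.List.pyGet?_natCast, List.getElem?_eq_getElem hln]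
    have hnext : (fun c => (cur.modify (cs[l]'hln) 0 (· - 1)).getD c 0)
        = pvCnt cs (l+1) (r+1) := by
      funext c
      rw [PySem.Dict.getD_modify, pvCnt_pop cs l (r+1) (by omega) (by omega) c]
      split_ifs with h
      · rw [hcur (cs[l]'hln), h]
      · rw [hcur c]
    have hnnd : (cur.modify (cs[l]'hln) 0 (· - 1)).keys.Nodup := by
      rw [PySem.Dict.keys_modify]
      exact PySem.Dict.nodup_keys_insert _ _ _ hcnd
    have htest : pvCtrEq (pvCtrAnd (cur.modify (cs[l]'hln) 0 (· - 1)) N) N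
        = pvCov N cs (l+1) r := by
      rw [pvCtrEq_and N _ hN hpos hnnd, hnext]
      rfl
    have hstep : solveLoopA N cs (f+1) cur l =
        (if pvCov N cs (l+1) r = true
         then solveLoopA N cs f (cur.modify (cs[l]'hln) 0 (· - 1)) (l+1)
         else (cur, l)) := by
      simp only [solveLoopA, hget, htest]
    rw [hstep]
    by_cases hc : pvCov N cs (l+1) r = true
    · rw [if_pos hc]
      have hl1r : l + 1 ≤ r := by
        have := pvCov_le N hpos hne cs (l+1) (r+1) (by omega) hc
        omega
      obtain ⟨c1, c2, c3, c4, c5, c6⟩ :=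
        ih (l+1) (cur.modify (cs[l]'hln) 0 (· - 1)) hl1r (by omega)
          (fun c => congrFun hnext c) hnnd
      refine ⟨c1, c2, by omega, c4, ?_, ?_⟩
      · intro _
        exact c5 hc
      · intro h
        exfalso
        have := pvCov_mono_left N cs (l+1) l r (by omega) hc
        rw [h] at this
        exact Bool.false_ne_true this
    · rw [if_neg hc]
      refine ⟨hcur, hcnd, le_refl l, hlr, ?_, fun _ => rfl⟩
      intro h
      exact ⟨h, Bool.eq_false_iff.mpr hc⟩

-- occ's list for a needed char holds exactly the positions of that char so far
lemma pvPosN_snoc (cs : List Char) (c : Char) (m : Nat) :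
    pvPosN cs c (m+1) = pvPosN cs c m ++ (if cs[m]? == some c then [m] else []) := by
  unfold pvPosN
  rw [List.range_succ, List.filter_append]
  by_cases h : cs[m]? = some c <;> simp [h]

lemma pvPosN_lt (cs : List Char) (c : Char) (m : Nat) :
    ∀ i ∈ pvPosN cs c m, i < m := by
  intro i hi
  have := List.of_mem_filter hi
  have hm : i ∈ List.range m := List.mem_of_mem_filter hi
  simpa using hm

lemma pvCnt_eq_filter (cs : List Char) (c : Char) :
    ∀ (m l : Nat), l ≤ m → m ≤ cs.length →
      pvCnt cs l m c = (((pvPosN cs c m).filter (fun i => l ≤ i)).length : Int) := by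
  intro m
  induction m with
  | zero =>
    intro l hl _
    interval_cases l
    simp [pvCnt, pvWin, pvPosN]
  | succ m ih =>
    intro l hl hm
    rcases Nat.lt_or_ge l (m+1) with hlm | hlm
    · -- l ≤ m
      have hl' : l ≤ m := by omega
      rw [pvCnt_push cs l m hl' (by omega), pvPosN_snoc, List.filter_append,
        List.length_append, ih l hl' (by omega)]
      have hgm : cs[m]? = some (cs[m]'(by omega)) := List.getElem?_eq_getElem (by omega)
      rcases eq_or_ne c (cs[m]'(by omega)) with he | he
      · rw [if_pos he]
        have : (cs[m]? == some c) = true := by rw [hgm, he]; simp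
        rw [this]
        have hfl : List.filter (fun i => decide (l ≤ i)) [m] = [m] := by
          simp [hl']
        push_cast
        simp [hl']
      · rw [if_neg he]
        have : (cs[m]? == some c) = false := by
          rw [hgm]; simpa using (Ne.symm he)
        rw [this]
        simp
    · -- l = m+1 : empty window, no position passes the filter
      have hl1 : l = m + 1 := by omega
      subst hl1
      have h1 : pvCnt cs (m+1) (m+1) c = 0 := by
        have : pvWin cs (m+1) (m+1) = [] := by
          apply List.eq_nil_of_length_eq_zero
          simp [pvWin]
        simp [pvCnt, this]
      have h2 : (pvPosN cs c (m+1)).filter (fun i => m+1 ≤ i) = [] := by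
        rw [List.filter_eq_nil_iff]
        intro i hi
        have := pvPosN_lt cs c (m+1) i hi
        simp
        omega
      rw [h1, h2]
      simp

lemma pvPosN_sorted (cs : List Char) (c : Char) (m : Nat) :
    (pvPosN cs c m).Pairwise (· < ·) :=
  (List.pairwise_lt_range).sublist List.filter_sublist

-- k-th-from-last element of a sorted position list vs the count of positions ≥ l
lemma pvKthLast : ∀ (P : List Nat), P.Pairwise (· < ·) → ∀ (k : Nat), 1 ≤ k → k ≤ P.length →
    ∀ (l : Nat), (l ≤ P.getD (P.length - k) 0 ↔ k ≤ (P.filter (fun i => l ≤ i)).length) := by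
  intro P
  induction P with
  | nil => intro _ k hk1 hk; simp at hk; omega
  | cons p Q ih =>
    intro hs k hk1 hk l
    rw [List.pairwise_cons] at hs
    obtain ⟨hpQ, hQ⟩ := hs
    rw [List.filter_cons]
    by_cases hlp : l ≤ p
    · -- every element passes: p is the minimum
      have hQf : Q.filter (fun i => decide (l ≤ i)) = Q := by
        rw [List.filter_eq_self]
        intro x hx
        have := hpQ x hx
        simp
        omega
      simp only [decide_eq_true hlp, if_pos]
      rw [hQf]
      have hlen : (p :: Q).length = Q.length + 1 := by simp
      constructor
      · intro _
        simpa using hk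
      · intro _
        have hidx : (p :: Q).length - k < (p :: Q).length := by omega
        rw [List.getD_eq_getElem _ 0 hidx]
        have hmem := List.getElem_mem hidx
        rcases List.mem_cons.mp hmem with he | he
        · rw [he]; exact hlp
        · have := hpQ _ he; omega
    · -- p fails the filter
      have hcond : (decide (l ≤ p)) = false := by simpa using hlp
      rw [hcond, if_neg (by simp)]
      by_cases hk' : k ≤ Q.length
      · have hidx : (p :: Q).length - k = (Q.length - k) + 1 := by simp; omega
        rw [hidx]
        simpa using ih hQ k hk1 hk' l
      · -- k = len + 1 : both sides false
        have hkk : k = Q.length + 1 := by simp at hk; omega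
        have hidx : (p :: Q).length - k = 0 := by simp; omega
        rw [hidx]
        simp only [List.getD_cons_zero]
        constructor
        · intro h; omega
        · intro h
          have := List.length_filter_le (fun i => decide (l ≤ i)) Q
          omega

-- B's inner loop characterized: ok ⟺ covered at start 0; best = the maximal covered start
lemma pvInnerB (N : PySem.Dict Char Int) (cs : List Char) (r : Nat) (hr : r < cs.length)
    (occ : PySem.Dict Char (List Int))
    (hocc : ∀ c, N.contains c = true → occ.getD c [] = pvPos cs c (r+1)) :
    ∀ (L : List (Char × Int)) (best : Int),
      (∀ p ∈ L, p ∈ N.items) → (∀ p ∈ L, 1 ≤ p.2) → 0 ≤ best → best ≤ (r : Int) →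
      ((solveInnerB occ L best).1 = true → ∀ p ∈ L, p.2 ≤ pvCnt cs 0 (r+1) p.1) ∧
      ((solveInnerB occ L best).1 = false → ∃ p ∈ L, ¬ (p.2 ≤ pvCnt cs 0 (r+1) p.1)) ∧
      ((solveInnerB occ L best).1 = true →
        0 ≤ (solveInnerB occ L best).2 ∧ (solveInnerB occ L best).2 ≤ best ∧
        ∀ l : Nat, l ≤ r →
          ((l : Int) ≤ (solveInnerB occ L best).2 ↔
            ((l : Int) ≤ best ∧ ∀ p ∈ L, p.2 ≤ pvCnt cs l (r+1) p.1))) := by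
  intro L
  induction L with
  | nil =>
    intro best _ _ hb0 hbr
    refine ⟨fun _ p hp => absurd hp (List.not_mem_nil), fun h => by exact absurd h (by simp [solveInnerB]), ?_⟩
    intro _
    refine ⟨hb0, le_refl _, fun l _ => ?_⟩
    simp [solveInnerB]
  | cons ck rest ih =>
    obtain ⟨c, k⟩ := ck
    intro best hsub hpos1 hb0 hbr
    have hcN : (c, k) ∈ N.items := hsub _ List.mem_cons_self
    have hcont : N.contains c = true := by
      rw [PySem.Dict.contains_iff_mem_keys]
      exact PySem.Dict.mem_keys_of_mem_items N hcN
    have hlst : occ.getD c [] = pvPos cs c (r+1) := hocc c hcont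
    have hlen : (occ.getD c []).length = (pvPosN cs c (r+1)).length := by
      rw [hlst]; simp [pvPos]
    have hk1 : (1 : Int) ≤ k := hpos1 _ List.mem_cons_self
    have hcnt0 : pvCnt cs 0 (r+1) c = ((pvPosN cs c (r+1)).length : Int) := by
      rw [pvCnt_eq_filter cs c (r+1) 0 (by omega) (by omega)]
      congr 2
      rw [List.filter_eq_self]
      intro x _
      simp
    by_cases hshort : ((occ.getD c []).length : Int) < k
    · have hq : solveInnerB occ ((c, k) :: rest) best = (false, best) := by
        simp only [solveInnerB, if_pos hshort]
      rw [hq]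
      refine ⟨?_, ?_, ?_⟩
      · intro h
        simp at h
      · intro _
        refine ⟨(c, k), List.mem_cons_self, ?_⟩
        rw [hcnt0]
        simp only
        omega
      · intro h
        simp at h
    · -- k elements available: read the k-th-last occurrence
      have hkm : k.toNat ≤ (pvPosN cs c (r+1)).length := by omega
      have hk1n : 1 ≤ k.toNat := by omega
      have hkcast : (k.toNat : Int) = k := Int.toNat_of_nonneg (by omega)
      set P := pvPosN cs c (r+1) with hP
      set j := P.length - k.toNat with hj
      have hjlt : j < P.length := by omega
      have hvget : PySem.List.pyGet? (occ.getD c []) (-k) = some ((P.getD j 0 : Nat) : Int) := by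
        have h0 := PySem.List.pyGet?_neg_natCast (occ.getD c []) k.toNat (by omega) (by omega)
        rw [hkcast] at h0
        rw [h0, hlst]
        have hplen : (pvPos cs c (r+1)).length = P.length := by simp [pvPos, hP]
        rw [hplen, ← hj]
        have hmapeq : pvPos cs c (r+1) = List.map (fun i : Nat => (i : Int)) P := by
          rw [hP]; rfl
        rw [hmapeq, List.getElem?_map, List.getElem?_eq_getElem hjlt,
          List.getD_eq_getElem P 0 hjlt]
        rfl
      have hq : solveInnerB occ ((c, k) :: rest) best
          = solveInnerB occ rest
              (if ((P.getD j 0 : Nat) : Int) < best then ((P.getD j 0 : Nat) : Int) else best) := by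
        simp only [solveInnerB, if_neg hshort, hvget]
        rfl
      set v : Int := ((P.getD j 0 : Nat) : Int) with hv
      set best' : Int := if v < best then v else best with hbest'
      have hv0 : 0 ≤ v := by positivity
      have hvr : v ≤ (r : Int) := by
        have hmem : P.getD j 0 ∈ P := by
          rw [List.getD_eq_getElem P 0 hjlt]
          exact List.getElem_mem hjlt
        have := pvPosN_lt cs c (r+1) _ hmem
        rw [hv]
        omega
      have hb'0 : 0 ≤ best' := by rw [hbest']; split_ifs <;> omega
      have hb'r : best' ≤ (r : Int) := by rw [hbest']; split_ifs <;> omega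
      have hb'le : best' ≤ best := by rw [hbest']; split_ifs <;> omega
      have hb'v : best' ≤ v := by rw [hbest']; split_ifs <;> omega
      have hb'iff : ∀ x : Int, x ≤ best' ↔ (x ≤ best ∧ x ≤ v) := by
        intro x; rw [hbest']; split_ifs <;> omega
      -- the k-th-last occurrence is exactly the coverage threshold for c
      have hkey : ∀ l : Nat, l ≤ r → ((l : Int) ≤ v ↔ k ≤ pvCnt cs l (r+1) c) := by
        intro l hlr2
        rw [pvCnt_eq_filter cs c (r+1) l (by omega) (by omega), ← hP]
        have h4 := pvKthLast P (pvPosN_sorted cs c (r+1)) k.toNat hk1n hkm l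
        rw [← hj] at h4
        constructor
        · intro h
          have : l ≤ P.getD j 0 := by omega
          have := h4.mp this
          omega
        · intro h
          have : k.toNat ≤ (P.filter (fun i => l ≤ i)).length := by omega
          have := h4.mpr this
          omega
      obtain ⟨ih1, ih2, ih3⟩ := ih best' (fun p hp => hsub p (List.mem_cons_of_mem _ hp))
        (fun p hp => hpos1 p (List.mem_cons_of_mem _ hp)) hb'0 hb'r
      rw [hq]
      refine ⟨?_, ?_, ?_⟩
      · intro h p hp
        rcases List.mem_cons.mp hp with he | he
        · rw [he]
          simp only
          rw [hcnt0]
          omega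
        · exact ih1 h p he
      · intro h
        obtain ⟨p, hp, hnp⟩ := ih2 h
        exact ⟨p, List.mem_cons_of_mem _ hp, hnp⟩
      · intro h
        obtain ⟨d0, dle, diff⟩ := ih3 h
        refine ⟨d0, le_trans dle hb'le, ?_⟩
        intro l hlr2
        rw [diff l hlr2, hb'iff]
        constructor
        · rintro ⟨⟨h1, h2⟩, h3⟩
          refine ⟨h1, ?_⟩
          intro p hp
          rcases List.mem_cons.mp hp with he | he
          · rw [he]
            simp only
            exact (hkey l hlr2).mp h2
          · exact h3 p he
        · rintro ⟨h1, h2⟩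
          have hc2 := h2 (c, k) List.mem_cons_self
          simp only at hc2
          exact ⟨⟨h1, (hkey l hlr2).mpr hc2⟩, fun p hp => h2 p (List.mem_cons_of_mem _ hp)⟩

-- the two outer loops agree step by step
lemma pvOuterAB (N : PySem.Dict Char Int) (hN : N.keys.Nodup)
    (hpos : ∀ p ∈ N.items, 0 < p.2) (hne : N.items ≠ []) (cs : List Char) :
    ∀ (rest : List Char) (i l : Nat) (res : Int) (cur : PySem.Dict Char Int)
      (occ : PySem.Dict Char (List Int)),
      cs.drop i = rest → i ≤ cs.length → l ≤ i →
      (∀ c, cur.getD c 0 = pvCnt cs l i c) → cur.keys.Nodup →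
      (l = 0 ∨ (0 < i ∧ pvCov N cs l (i-1) = true)) →
      (∀ c, occ.contains c = N.contains c) →
      (∀ c, N.contains c = true → occ.getD c [] = pvPos cs c i) →
      solveOuterA N cs rest (res, l, cur) = solveOuterB N rest i occ res := by
  intro rest
  induction rest with
  | nil => intro i l res cur occ _ _ _ _ _ _ _ _; simp [solveOuterA, solveOuterB]
  | cons ch rest' ih =>
    intro i l res cur occ hdrop hilen hli hcur hcnd hInv hocont hoccD
    have hi : i < cs.length := by
      by_contra hcon
      rw [List.drop_eq_nil_of_le (le_of_not_gt hcon)] at hdrop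
      exact absurd hdrop (by simp)
    have hsplit := List.drop_eq_getElem_cons (l := cs) hi
    rw [hdrop] at hsplit
    injection hsplit with hch hrest
    subst hch
    have covIff : ∀ l0 : Nat, pvCov N cs l0 i = true ↔ ∀ p ∈ N.items, p.2 ≤ pvCnt cs l0 (i+1) p.1 := by
      intro l0
      simp [pvCov, pvSat, List.all_eq_true]
    -- A adds s[i] to the window counts
    have hcur1 : ∀ c, (cur.modify (cs[i]'hi) 0 (· + 1)).getD c 0 = pvCnt cs l (i+1) c := by
      intro c
      rw [PySem.Dict.getD_modify, pvCnt_push cs l i hli hi c]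
      split_ifs with h
      · rw [hcur (cs[i]'hi), h]
      · rw [hcur c]
    have hcnd1 : (cur.modify (cs[i]'hi) 0 (· + 1)).keys.Nodup := by
      rw [PySem.Dict.keys_modify]
      exact PySem.Dict.nodup_keys_insert _ _ _ hcnd
    obtain ⟨a1, a2, a3, a4, a5, a6⟩ :=
      pvInnerA N hN hpos hne cs i hi (cs.length + 1) l (cur.modify (cs[i]'hi) 0 (· + 1))
        hli (by omega) hcur1 hcnd1
    set l' := (solveLoopA N cs (cs.length + 1) (cur.modify (cs[i]'hi) 0 (· + 1)) l).2 with hl'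
    set cur' := (solveLoopA N cs (cs.length + 1) (cur.modify (cs[i]'hi) 0 (· + 1)) l).1 with hcur'
    have htestA : pvCtrEq (pvCtrAnd cur' N) N = pvCov N cs l' i := by
      rw [pvCtrEq_and N cur' hN hpos a2]
      have : (fun c => cur'.getD c 0) = pvCnt cs l' (i+1) := funext a1
      rw [this]
      rfl
    -- B appends i to ch's occurrence list (if ch is a needed char)
    set occ1 := if occ.contains (cs[i]'hi) then occ.modify (cs[i]'hi) [] (· ++ [(i : Int)]) else occ
      with hocc1def
    have hocont1 : ∀ c, occ1.contains c = N.contains c := by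
      intro c
      rw [hocc1def]
      split_ifs with h
      · rw [PySem.Dict.contains_modify]
        rcases eq_or_ne c (cs[i]'hi) with he | he
        · rw [he, ← hocont (cs[i]'hi)]
          simp [h]
        · simp [he, hocont c]
      · exact hocont c
    have hoccD1 : ∀ c, N.contains c = true → occ1.getD c [] = pvPos cs c (i+1) := by
      intro c hc
      have hsnoc : pvPos cs c (i+1)
          = pvPos cs c i ++ (if cs[i]? == some c then [(i : Int)] else []) := by
        unfold pvPos
        rw [pvPosN_snoc, List.map_append]
        congr 1
        split_ifs with h
        · simp
        · simp
      have hgi : cs[i]? = some (cs[i]'hi) := List.getElem?_eq_getElem hi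
      rw [hocc1def]
      rcases eq_or_ne c (cs[i]'hi) with he | he
      · subst he
        have hcont : occ.contains (cs[i]'hi) = true := by rw [hocont]; exact hc
        rw [if_pos hcont, PySem.Dict.getD_modify, if_pos rfl, hoccD _ hc, hsnoc, hgi]
        simp
      · have hne2 : (cs[i]? == some c) = false := by
          rw [hgi]
          simpa using (fun hx => he (by rw [hx]))
        rw [hsnoc, hne2]
        simp only [if_neg Bool.false_ne_true, List.append_nil]
        split_ifs with h
        · rw [PySem.Dict.getD_modify, if_neg he, hoccD _ hc]
        · exact hoccD _ hc
    obtain ⟨b1, b2, b3⟩ :=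
      pvInnerB N cs i hi occ1 hoccD1 N.items (i : Int) (fun p hp => hp)
        (fun p hp => by have := hpos p hp; omega) (by positivity) (le_refl _)
    set q := solveInnerB occ1 N.items (i : Int) with hq
    -- unfold one step of each loop
    have hAstep : solveOuterA N cs (cs[i]'hi :: rest') (res, l, cur)
        = solveOuterA N cs rest'
            ((if pvCov N cs l' i then res + ((l' : Int) + 1) else res), l', cur') := by
      simp only [solveOuterA, ← hl', ← hcur', htestA]
    have hBstep : solveOuterB N (cs[i]'hi :: rest') i occ res
        = solveOuterB N rest' (i+1) occ1 (if q.1 then res + q.2 + 1 else res) := by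
      simp only [solveOuterB, ← hocc1def, ← hq]
    rw [hAstep, hBstep]
    -- the invariant gives: coverage at l follows from coverage at 0
    have hInv' : pvCov N cs l i = true ∨ l = 0 := by
      rcases hInv with h | ⟨hi0, hcov⟩
      · exact Or.inr h
      · left
        have := pvCov_mono_right N cs l (i-1) (by omega) (by omega) hcov
        have heq : i - 1 + 1 = i := by omega
        rwa [heq] at this
    by_cases hc0 : pvCov N cs 0 i = true
    · -- covered: both sides add the maximal start + 1
      have hcl : pvCov N cs l i = true := by
        rcases hInv' with h | h
        · exact h
        · rwa [h]
      obtain ⟨hcovl', hncovl'⟩ := a5 hcl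
      have hq1 : q.1 = true := by
        by_contra hqf
        obtain ⟨p, hp, hnp⟩ := b2 (Bool.eq_false_iff.mpr hqf)
        exact hnp ((covIff 0).mp hc0 p hp)
      obtain ⟨q0, qle, qiff⟩ := b3 hq1
      have hql' : q.2 = (l' : Int) := by
        have h1 : (l' : Int) ≤ q.2 :=
          (qiff l' a4).mpr ⟨by exact_mod_cast a4, (covIff l').mp hcovl'⟩
        have h2 : ¬ ((l' + 1 : Nat) : Int) ≤ q.2 := by
          intro hle
          have hl1i : l' + 1 ≤ i := by
            have : ((l' + 1 : Nat) : Int) ≤ (i : Int) := le_trans hle qle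
            exact_mod_cast this
          have := ((qiff (l'+1) hl1i).mp hle).2
          have hcc := (covIff (l'+1)).mpr this
          rw [hcc] at hncovl'
          simp at hncovl'
        push_cast at h2 ⊢
        omega
      rw [if_pos hcovl', hq1, hql']
      have hres : (if true then res + (l' : Int) + 1 else res) = res + ((l' : Int) + 1) := by
        simp only [if_true]
        ring
      rw [hres]
      exact ih (i+1) l' (res + ((l' : Int) + 1)) cur' occ1 hrest.symm (by omega) (by omega)
        a1 a2 (Or.inr ⟨by omega, by simpa using hcovl'⟩) hocont1 hoccD1
    · -- not covered: neither side adds anything, and l must still be 0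
      have hl0 : l = 0 := by
        rcases hInv' with h | h
        · exfalso
          have := pvCov_mono_left N cs l 0 i (Nat.zero_le l) h
          rw [this] at hc0
          exact hc0 rfl
        · exact h
      have hclf : pvCov N cs l i = false := by
        rw [hl0]
        exact Bool.eq_false_iff.mpr hc0
      have hl'eq : l' = l := a6 hclf
      have hq1 : q.1 = false := by
        cases hqv : q.1
        · rfl
        · exact absurd ((covIff 0).mpr (b1 hqv)) hc0
      rw [hq1, hl'eq, hclf]
      simp only [Bool.false_eq_true, if_false]
      exact ih (i+1) l res cur' occ1 hrest.symm (by omega) (by omega)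
        (by rw [← hl'eq]; exact a1) a2 (Or.inl hl0) hocont1 hoccD1

-- the initial occ dict {c: [] for c in need} maps every key to []
lemma pvOcc0_getD : ∀ (L : List Char) (d : PySem.Dict Char (List Int)),
    (∀ c, d.getD c [] = []) →
    ∀ c, (L.foldl (fun d c => d.insert c ([] : List Int)) d).getD c [] = [] := by
  intro L
  induction L with
  | nil => intro d hd c; exact hd c
  | cons x xs ih =>
    intro d hd c
    simp only [List.foldl_cons]
    refine ih _ ?_ c
    intro c'
    rw [PySem.Dict.getD_insert]
    split_ifs with h
    · rfl
    · exact hd c'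

-- ===== VERDICT (by name: the statement is the Claim_ definition above) =====
theorem solve_spec : Claim_equal_solve := by
  intro s t _ hpre
  unfold Spec_solve
  rcases hpre with ht | hs
  · -- t ≠ "": run the outer coupling from the initial states
    have hts : t.toList ≠ [] := fun h => ht (String.toList_eq_nil_iff.mp h)
    simp only [solve, solve_alt]
    rw [PySem.Dict.foldl_insert_getD_add_one_eq_counter]
    have hN := PySem.Dict.nodup_keys_counter t.toList
    have hpos : ∀ p ∈ (PySem.Dict.counter t.toList).items, 0 < p.2 := by
      intro p hp
      rw [PySem.Dict.items_counter] at hp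
      obtain ⟨k, hk, rfl⟩ := List.mem_map.mp hp
      have hmem : k ∈ t.toList := (PySem.Set.mem_ofList t.toList k).mp hk
      simp only
      exact_mod_cast List.count_pos_iff.mpr hmem
    have hne : (PySem.Dict.counter t.toList).items ≠ [] := by
      rw [PySem.Dict.items_counter]
      obtain ⟨c, hc⟩ := List.exists_mem_of_ne_nil _ hts
      have hmem : c ∈ PySem.Set.ofList t.toList := (PySem.Set.mem_ofList _ _).mpr hc
      intro h
      rw [List.map_eq_nil_iff] at h
      rw [h] at hmem
      exact absurd hmem (List.not_mem_nil)
    have hkeys0 : ((PySem.Dict.counter t.toList).keys.foldl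
          (fun d c => d.insert c ([] : List Int)) PySem.Dict.empty).keys
        = PySem.Set.ofList (PySem.Dict.counter t.toList).keys := by
      rw [PySem.Dict.keys_foldl_insert, PySem.Dict.keys_empty]
      exact PySem.Set.update_nil_left _
    have hocont0 : ∀ c, ((PySem.Dict.counter t.toList).keys.foldl
          (fun d c => d.insert c ([] : List Int)) PySem.Dict.empty).contains c
        = (PySem.Dict.counter t.toList).contains c := by
      intro c
      rw [Bool.eq_iff_iff, PySem.Dict.contains_iff_mem_keys, PySem.Dict.contains_iff_mem_keys,
        hkeys0, PySem.Set.mem_ofList]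
    have hoccD0 : ∀ c, (PySem.Dict.counter t.toList).contains c = true →
        ((PySem.Dict.counter t.toList).keys.foldl
          (fun d c => d.insert c ([] : List Int)) PySem.Dict.empty).getD c []
        = pvPos s.toList c 0 := by
      intro c _
      rw [pvOcc0_getD _ _ (fun c' => PySem.Dict.getD_empty c' []) c]
      simp [pvPos, pvPosN]
    have hcnt00 : ∀ c, (PySem.Dict.empty : PySem.Dict Char Int).getD c 0
        = pvCnt s.toList 0 0 c := by
      intro c
      rw [PySem.Dict.getD_empty]
      simp [pvCnt, pvWin]
    exact pvOuterAB (PySem.Dict.counter t.toList) hN hpos hne s.toList s.toList 0 0 0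
      PySem.Dict.empty _ rfl (Nat.zero_le _) (le_refl 0) hcnt00 PySem.Dict.nodup_keys_empty
      (Or.inl rfl) hocont0 hoccD0
  · -- s = "": both loops are empty
    subst hs
    simp [solve, solve_alt, solveOuterA, solveOuterB]
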